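-- pv_equiv track=rewrite | github.com/ydelvis/privLess | src/utils/postprocess_truncated_values.py | _get_extended_context
-- ===== SOURCE A (Python) =====
-- from typing import Dict, List, Optional, Tuple
--
-- def _get_extended_context(
--
--     lines: List[str],
--     start_line_idx: int,
--     start_col_idx: int,
--     max_chars: int
-- ) -> str:
--     """Get extended context from the source file."""
--     result = []
--     chars_collected = 0
--
--     for i in range(start_line_idx, min(start_line_idx + 20, len(lines))):
--         line = lines[i]
--         if i == start_line_idx:
--             line = line[start_col_idx:]
--         result.append(line)
--         chars_collected += len(line)
--         if chars_collected >= max_chars: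
--             break
--
--     return ''.join(result)
-- ===== SOURCE B (Python) =====
-- from itertools import accumulate
-- from bisect import bisect_left
--
-- def _get_extended_context(
--     lines,
--     start_line_idx,
--     start_col_idx,
--     max_chars
-- ):
--     """Get extended context from the source file."""
--     stop = min(start_line_idx + 20, len(lines))
--     seg = [lines[i] for i in range(start_line_idx, stop)]
--     if seg:
--         seg[0] = seg[0][start_col_idx:]
--     totals = list(accumulate(map(len, seg)))
--     j = bisect_left(totals, max_chars)
--     if j < len(seg):
--         seg = seg[:j + 1]
--     return ''.join(seg)
-- ===== Notes on version B (the rewrite author's own statement) =====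
-- stated objective: alternative
-- what changed: Replaces the accumulate-and-break loop by building the capped 20-line segment up front, computing running character totals with itertools.accumulate, and locating the inclusive cutoff line with bisect_left on the prefix sums.
import Mathlib
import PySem

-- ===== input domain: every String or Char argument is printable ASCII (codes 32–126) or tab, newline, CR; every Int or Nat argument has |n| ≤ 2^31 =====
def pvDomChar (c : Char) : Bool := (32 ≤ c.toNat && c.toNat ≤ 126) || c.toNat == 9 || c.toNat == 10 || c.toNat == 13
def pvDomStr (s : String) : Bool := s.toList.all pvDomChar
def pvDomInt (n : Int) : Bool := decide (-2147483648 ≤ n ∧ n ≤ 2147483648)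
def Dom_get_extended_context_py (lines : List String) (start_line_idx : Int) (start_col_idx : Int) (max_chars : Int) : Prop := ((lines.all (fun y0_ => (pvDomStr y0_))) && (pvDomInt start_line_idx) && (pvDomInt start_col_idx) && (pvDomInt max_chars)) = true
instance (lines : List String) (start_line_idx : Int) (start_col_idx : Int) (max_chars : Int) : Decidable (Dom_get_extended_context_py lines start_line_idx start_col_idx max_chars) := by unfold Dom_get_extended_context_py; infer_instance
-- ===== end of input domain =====

-- B builds the capped segment up front and finds the inclusive cutoff on prefix sums with
-- bisect_left instead of A's accumulate-and-break loop (objective: alternative decomposition).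

-- ===== PORT A =====
-- A's for-loop with break, as structural recursion over the index range; out-of-range
-- indices (excluded by Pre_) default to "" via pyGetD.
def pvALoop (lines : List String) (sli scol mx : Int) :
    List Int → List String → Int → List String
  | [], result, _ => result
  | i :: rest, result, chars =>
    let line0 := PySem.List.pyGetD lines i ""
    let line := if i = sli then PySem.Str.slice line0 (some scol) none else line0
    let result' := result ++ [line]
    let chars' := chars + PySem.Str.len line
    if mx ≤ chars' then result' else pvALoop lines sli scol mx rest result' chars'

def get_extended_context_py (lines : List String) (start_line_idx : Int) (start_col_idx : Int) (max_chars : Int) : String :=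
  PySem.Str.join ""
    (pvALoop lines start_line_idx start_col_idx max_chars
      (PySem.List.pyRange start_line_idx (min (start_line_idx + 20) (lines.length : Int)) 1) [] 0)

-- ===== PORT B =====
-- itertools.accumulate over the line lengths
def pvAccum : List Int → Int → List Int
  | [], _ => []
  | x :: xs, acc => (acc + x) :: pvAccum xs (acc + x)

def get_extended_context_py_alt (lines : List String) (start_line_idx : Int) (start_col_idx : Int) (max_chars : Int) : String :=
  let stop := min (start_line_idx + 20) (lines.length : Int)
  let seg0 := (PySem.List.pyRange start_line_idx stop 1).map (fun i => PySem.List.pyGetD lines i "")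
  let seg : List String :=
    match seg0 with
    | [] => []
    | h :: t => PySem.Str.slice h (some start_col_idx) none :: t
  let totals := pvAccum (seg.map PySem.Str.len) 0
  let j := PySem.List.bisectLeft totals max_chars
  let seg' := if j < seg.length then seg.take (j + 1) else seg
  PySem.Str.join "" seg'

-- ===== PRECONDITION & SPEC =====
-- Pre_ excludes exactly the inputs on which A raises IndexError (a nonempty index range
-- starting below -len(lines)); B raises there identically.
def Pre_get_extended_context_py (lines : List String) (start_line_idx : Int) (start_col_idx : Int) (max_chars : Int) : Prop :=
  -(lines.length : Int) ≤ start_line_idx ∨ min (start_line_idx + 20) (lines.length : Int) ≤ start_line_idx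
instance (lines : List String) (start_line_idx : Int) (start_col_idx : Int) (max_chars : Int) : Decidable (Pre_get_extended_context_py lines start_line_idx start_col_idx max_chars) := by unfold Pre_get_extended_context_py; infer_instance

def pvWitness_get_extended_context_py : List String × Int × Int × Int := (["abc", "def"], 0, 1, 4)

def Spec_get_extended_context_py (lines : List String) (start_line_idx : Int) (start_col_idx : Int) (max_chars : Int) (out : String) : Prop := out = get_extended_context_py_alt lines start_line_idx start_col_idx max_chars
instance (lines : List String) (start_line_idx : Int) (start_col_idx : Int) (max_chars : Int) (out : String) : Decidable (Spec_get_extended_context_py lines start_line_idx start_col_idx max_chars out) := by unfold Spec_get_extended_context_py; infer_instance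

-- ===== CLAIM (what is proved, stated in full; the proofs are below) =====
def Claim_equal_get_extended_context_py : Prop := ∀ (lines : List String) (start_line_idx : Int) (start_col_idx : Int) (max_chars : Int), Dom_get_extended_context_py lines start_line_idx start_col_idx max_chars → Pre_get_extended_context_py lines start_line_idx start_col_idx max_chars → Spec_get_extended_context_py lines start_line_idx start_col_idx max_chars (get_extended_context_py lines start_line_idx start_col_idx max_chars)

-- ===== LEMMAS AND PROOFS =====

-- A's loop, abstracted to the list of collected strings: keep lines until the running
-- total first reaches mx (inclusive).
def pvTake (mx : Int) : List String → Int → List String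
  | [], _ => []
  | s :: rest, chars =>
    if mx ≤ chars + PySem.Str.len s then [s]
    else s :: pvTake mx rest (chars + PySem.Str.len s)

theorem pvALoop_eq_pvTake (lines : List String) (sli scol mx : Int) :
    ∀ (idxs : List Int) (result : List String) (chars : Int),
      pvALoop lines sli scol mx idxs result chars =
        result ++ pvTake mx (idxs.map (fun i =>
          if i = sli then PySem.Str.slice (PySem.List.pyGetD lines i "") (some scol) none
          else PySem.List.pyGetD lines i "")) chars := by
  intro idxs
  induction idxs with
  | nil => intro result chars; simp [pvALoop, pvTake]
  | cons i rest ih =>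
    intro result chars
    simp only [pvALoop, List.map_cons, pvTake]
    split_ifs <;> first | (rw [ih]; simp) | simp

theorem pvTake_eq_take_findIdx (mx : Int) :
    ∀ (ss : List String) (chars : Int),
      pvTake mx ss chars =
        ss.take ((List.findIdx (fun t => decide (mx ≤ t)) (pvAccum (ss.map PySem.Str.len) chars)) + 1) := by
  intro ss
  induction ss with
  | nil => intro chars; simp [pvTake, pvAccum]
  | cons s rest ih =>
    intro chars
    simp only [pvTake, List.map_cons, pvAccum, List.findIdx_cons]
    by_cases h : mx ≤ chars + (s.length : Int)
    · simp [PySem.Str.len_eq, h]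
    · simp [PySem.Str.len_eq, h, ih]

theorem pvAccum_mem_le (xs : List Int) (h0 : ∀ x ∈ xs, 0 ≤ x) :
    ∀ (acc : Int), ∀ t ∈ pvAccum xs acc, acc ≤ t := by
  induction xs with
  | nil => intro acc t ht; simp [pvAccum] at ht
  | cons x rest ih =>
    intro acc t ht
    simp only [pvAccum, List.mem_cons] at ht
    have hx : 0 ≤ x := h0 x (by simp)
    rcases ht with rfl | ht
    · omega
    · have := ih (fun y hy => h0 y (by simp [hy])) (acc + x) t ht
      omega

theorem pvAccum_sorted (xs : List Int) (h0 : ∀ x ∈ xs, 0 ≤ x) (acc : Int) :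
    (pvAccum xs acc).Pairwise (· ≤ ·) := by
  induction xs generalizing acc with
  | nil => simp [pvAccum]
  | cons x rest ih =>
    simp only [pvAccum, List.pairwise_cons]
    refine ⟨fun t ht => pvAccum_mem_le rest (fun y hy => h0 y (by simp [hy])) (acc + x) t ht,
      ih (fun y hy => h0 y (by simp [hy])) (acc + x)⟩

theorem bisectLeft_eq_findIdx (totals : List Int) (mx : Int)
    (hs : totals.Pairwise (· ≤ ·)) :
    PySem.List.bisectLeft totals mx = List.findIdx (fun t => decide (mx ≤ t)) totals := by
  obtain ⟨hle, hlt, hge⟩ := PySem.List.bisectLeft_spec totals mx hs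
  set j := PySem.List.bisectLeft totals mx with hj
  by_cases hjl : j < totals.length
  · symm
    rw [List.findIdx_eq hjl]
    constructor
    · simpa using hge j hjl (le_refl j)
    · intro k hk
      have hkl : k < totals.length := lt_trans hk hjl
      have := hlt k hkl hk
      simp; omega
  · have hj_eq : j = totals.length := by omega
    rw [hj_eq]
    symm
    rw [List.findIdx_eq_length]
    intro t ht
    obtain ⟨k, hkl, rfl⟩ := List.mem_iff_getElem.mp ht
    have := hlt k hkl (by omega)
    simp; omega

theorem pvAccum_length : ∀ (xs : List Int) (acc : Int), (pvAccum xs acc).length = xs.length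
  | [], _ => by simp [pvAccum]
  | x :: r, acc => by simp [pvAccum, pvAccum_length r]

theorem str_len_nonneg (s : String) : 0 ≤ PySem.Str.len s := by
  simp [PySem.Str.len_eq]

theorem get_extended_context_py_spec : Claim_equal_get_extended_context_py := by
  intro lines sli scol mx _ _
  unfold Spec_get_extended_context_py get_extended_context_py get_extended_context_py_alt
  set stop := min (sli + 20) (lines.length : Int) with hstop
  -- the segment both sides work on
  have hseg :
      (match (PySem.List.pyRange sli stop 1).map (fun i => PySem.List.pyGetD lines i "") with
        | [] => ([] : List String)
        | h :: t => PySem.Str.slice h (some scol) none :: t) =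
      (PySem.List.pyRange sli stop 1).map (fun i =>
        if i = sli then PySem.Str.slice (PySem.List.pyGetD lines i "") (some scol) none
        else PySem.List.pyGetD lines i "") := by
    by_cases hlt : sli < stop
    · rw [PySem.List.pyRange_one_cons hlt]
      simp only [List.map_cons]
      congr 1
      apply List.map_congr_left
      intro i hi
      have := (PySem.List.mem_pyRange_one.mp hi).1
      have hne : i ≠ sli := by omega
      simp [hne]
    · rw [PySem.List.pyRange_one_eq_nil (by omega)]
      simp
  simp only [hseg]
  set seg := (PySem.List.pyRange sli stop 1).map (fun i =>
        if i = sli then PySem.Str.slice (PySem.List.pyGetD lines i "") (some scol) none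
        else PySem.List.pyGetD lines i "") with hsegdef
  rw [pvALoop_eq_pvTake, pvTake_eq_take_findIdx]
  simp only [List.nil_append]
  have hnn : ∀ x ∈ seg.map PySem.Str.len, 0 ≤ x := by
    intro x hx
    obtain ⟨s, _, rfl⟩ := List.mem_map.mp hx
    exact str_len_nonneg s
  have hsorted := pvAccum_sorted (seg.map PySem.Str.len) hnn 0
  rw [bisectLeft_eq_findIdx _ mx hsorted]
  set j := List.findIdx (fun t => decide (mx ≤ t)) (pvAccum (seg.map PySem.Str.len) 0) with hjdef
  by_cases hjl : j < seg.length
  · rw [if_pos hjl]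
  · rw [if_neg hjl]
    have hlen : (pvAccum (seg.map PySem.Str.len) 0).length = seg.length := by
      rw [pvAccum_length, List.length_map]
    have hjle : j ≤ seg.length := hlen ▸ List.findIdx_le_length
    have : j = seg.length := le_antisymm hjle (Nat.le_of_not_lt hjl)
    rw [this, List.take_of_length_le (Nat.le_succ _)]
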